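-- pv_equiv track=rewrite | github.com/Jqwu12/gnss_scripts | funcs/constants.py | gns_sat
-- ===== SOURCE A (Python) =====
-- _GNS_NAME = {'G':  'GPS',
--              'R':  'GLO',
--              'E':  'GAL',
--              'C':  'BDS',
--              'C2': 'BD2',
--              'C3': 'BD3',
--              'CG': 'BDG',
--              'CI': 'BDI',
--              'CM': 'BDM',
--              'J':  'QZS'}
--
-- def gns_name(gsys: str) -> str:
--     if len(gsys) < 3:
--         if gsys in _GNS_NAME.keys():
--             return _GNS_NAME[gsys]
--     if len(gsys) == 3:
--         if gsys in _GNS_NAME.values():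
--             return gsys
--     return ''
--
-- def gns_sat(gsys, sats_rm=None) -> list:
--     if sats_rm is None:
--         sats_rm = []
--     gsys = gns_name(gsys)
--     if gsys == 'GPS':
--         _GPS_SAT = [f"G{i:0>2d}" for i in range(1, 33)]
--         _GPS_SAT_EXC = []  # G04 is now available
--         _GPS_SAT_EXC.extend(sats_rm)
--         _GPS_SAT = list(set(_GPS_SAT).difference(set(_GPS_SAT_EXC)))
--         _GPS_SAT.sort()
--         return _GPS_SAT
--     elif gsys == 'BDS':
--         _BDS_SAT = [f"C{i:0>2d}" for i in range(1, 62) if i < 47 or i > 58]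
--         _BDS_SAT_EXC = ['C15', 'C17', 'C18', 'C31', 'C61']
--         _BDS_SAT_EXC.extend(sats_rm)
--         _BDS_SAT = list(set(_BDS_SAT).difference(set(_BDS_SAT_EXC)))
--         _BDS_SAT.sort()
--         return _BDS_SAT
--     elif gsys == 'BD2':
--         _BDS_SAT = [f"C{i:0>2d}" for i in range(1, 17)]
--         _BDS_SAT_EXC = ['C15']
--         _BDS_SAT_EXC.extend(sats_rm)
--         _BDS_SAT = list(set(_BDS_SAT).difference(set(_BDS_SAT_EXC)))
--         _BDS_SAT.sort()
--         return _BDS_SAT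
--     elif gsys == 'BD3':
--         _BDS_SAT = [f"C{i:0>2d}" for i in range(19, 62) if i < 47 or i > 58]
--         _BDS_SAT_EXC = ['C31', 'C61']
--         _BDS_SAT_EXC.extend(sats_rm)
--         _BDS_SAT = list(set(_BDS_SAT).difference(set(_BDS_SAT_EXC)))
--         _BDS_SAT.sort()
--         return _BDS_SAT
--     elif gsys == 'BDG':
--         _BDS_SAT = ['C01', 'C02', 'C03', 'C04', 'C05', 'C59', 'C60']
--         _BDS_SAT = list(set(_BDS_SAT).difference(set(sats_rm)))
--         _BDS_SAT.sort()
--         return _BDS_SAT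
--     elif gsys == 'BDI':
--         _BDS_SAT = ['C06', 'C07', 'C08', 'C09', 'C10', 'C13', 'C16', 'C38', 'C39', 'C40']
--         _BDS_SAT = list(set(_BDS_SAT).difference(set(sats_rm)))
--         _BDS_SAT.sort()
--         return _BDS_SAT
--     elif gsys == 'BDM':
--         _BDS_SAT = [f"C{i:0>2d}" for i in range(11, 47)]
--         _BDS_SAT_EXC = ['C13', 'C16', 'C38', 'C39', 'C40']
--         _BDS_SAT_EXC.extend(sats_rm)
--         _BDS_SAT = list(set(_BDS_SAT).difference(set(_BDS_SAT_EXC)))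
--         _BDS_SAT.sort()
--         return _BDS_SAT
--     elif gsys == 'GAL':
--         _GAL_SAT = [f"E{i:0>2d}" for i in range(1, 37)]
--         _GAL_SAT_EXC = ['E20', 'E22', 'E06', 'E10', 'E16', 'E17', 'E23', 'E28', 'E29', 'E32', 'E34', 'E35']
--         _GAL_SAT_EXC.extend(sats_rm)
--         _GAL_SAT = list(set(_GAL_SAT).difference(set(_GAL_SAT_EXC)))
--         _GAL_SAT.sort()
--         return _GAL_SAT
--     elif gsys == 'GLO':
--         _GLO_SAT = [f"R{i:0>2d}" for i in range(1, 25)]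
--         _GLO_SAT_EXC = []
--         _GLO_SAT_EXC.extend(sats_rm)
--         _GLO_SAT = list(set(_GLO_SAT).difference(set(_GLO_SAT_EXC)))
--         _GLO_SAT.sort()
--         return _GLO_SAT
--     elif gsys == 'QZS':
--         _QZS_SAT = [f"J{i:0>2d}" for i in range(1, 8)]
--         _QZS_SAT_EXC = []
--         _QZS_SAT_EXC.extend(sats_rm)
--         _QZS_SAT = list(set(_QZS_SAT).difference(set(_QZS_SAT_EXC)))
--         _QZS_SAT.sort()
--         return _QZS_SAT
--     return []
-- ===== SOURCE B (Python) =====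
-- # Table-driven re-implementation: one lookup plus one ordered filter pass replaces
-- # A's ten-branch if/elif chain of per-system set-difference-then-sort blocks.
--
-- _ALIAS = {'G':  'GPS',
--           'R':  'GLO',
--           'E':  'GAL',
--           'C':  'BDS',
--           'C2': 'BD2',
--           'C3': 'BD3',
--           'CG': 'BDG',
--           'CI': 'BDI',
--           'CM': 'BDM',
--           'J':  'QZS'}
--
-- # For each system: (sorted duplicate-free base list, fixed exclusions).
-- _TABLE = {
--     'GPS': (['G01', 'G02', 'G03', 'G04', 'G05', 'G06', 'G07', 'G08', 'G09', 'G10', 'G11', 'G12', 'G13', 'G14', 'G15', 'G16', 'G17', 'G18', 'G19', 'G20', 'G21', 'G22', 'G23', 'G24', 'G25', 'G26', 'G27', 'G28', 'G29', 'G30', 'G31', 'G32'],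
--             []),
--     'BDS': (['C01', 'C02', 'C03', 'C04', 'C05', 'C06', 'C07', 'C08', 'C09', 'C10', 'C11', 'C12', 'C13', 'C14', 'C15', 'C16', 'C17', 'C18', 'C19', 'C20', 'C21', 'C22', 'C23', 'C24', 'C25', 'C26', 'C27', 'C28', 'C29', 'C30', 'C31', 'C32', 'C33', 'C34', 'C35', 'C36', 'C37', 'C38', 'C39', 'C40', 'C41', 'C42', 'C43', 'C44', 'C45', 'C46', 'C59', 'C60', 'C61'],
--             ['C15', 'C17', 'C18', 'C31', 'C61']),
--     'BD2': (['C01', 'C02', 'C03', 'C04', 'C05', 'C06', 'C07', 'C08', 'C09', 'C10', 'C11', 'C12', 'C13', 'C14', 'C15', 'C16'],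
--             ['C15']),
--     'BD3': (['C19', 'C20', 'C21', 'C22', 'C23', 'C24', 'C25', 'C26', 'C27', 'C28', 'C29', 'C30', 'C31', 'C32', 'C33', 'C34', 'C35', 'C36', 'C37', 'C38', 'C39', 'C40', 'C41', 'C42', 'C43', 'C44', 'C45', 'C46', 'C59', 'C60', 'C61'],
--             ['C31', 'C61']),
--     'BDG': (['C01', 'C02', 'C03', 'C04', 'C05', 'C59', 'C60'],
--             []),
--     'BDI': (['C06', 'C07', 'C08', 'C09', 'C10', 'C13', 'C16', 'C38', 'C39', 'C40'],
--             []),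
--     'BDM': (['C11', 'C12', 'C13', 'C14', 'C15', 'C16', 'C17', 'C18', 'C19', 'C20', 'C21', 'C22', 'C23', 'C24', 'C25', 'C26', 'C27', 'C28', 'C29', 'C30', 'C31', 'C32', 'C33', 'C34', 'C35', 'C36', 'C37', 'C38', 'C39', 'C40', 'C41', 'C42', 'C43', 'C44', 'C45', 'C46'],
--             ['C13', 'C16', 'C38', 'C39', 'C40']),
--     'GAL': (['E01', 'E02', 'E03', 'E04', 'E05', 'E06', 'E07', 'E08', 'E09', 'E10', 'E11', 'E12', 'E13', 'E14', 'E15', 'E16', 'E17', 'E18', 'E19', 'E20', 'E21', 'E22', 'E23', 'E24', 'E25', 'E26', 'E27', 'E28', 'E29', 'E30', 'E31', 'E32', 'E33', 'E34', 'E35', 'E36'],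
--             ['E20', 'E22', 'E06', 'E10', 'E16', 'E17', 'E23', 'E28', 'E29', 'E32', 'E34', 'E35']),
--     'GLO': (['R01', 'R02', 'R03', 'R04', 'R05', 'R06', 'R07', 'R08', 'R09', 'R10', 'R11', 'R12', 'R13', 'R14', 'R15', 'R16', 'R17', 'R18', 'R19', 'R20', 'R21', 'R22', 'R23', 'R24'],
--             []),
--     'QZS': (['J01', 'J02', 'J03', 'J04', 'J05', 'J06', 'J07'],
--             []),
-- }
--
--
-- def gns_sat(gsys, sats_rm=None) -> list:
--     entry = _TABLE.get(gsys)
--     if entry is None: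
--         entry = _TABLE.get(_ALIAS.get(gsys, ''))
--     if entry is None:
--         return []
--     base, exc = entry
--     skip = set(exc)
--     skip.update(sats_rm or [])
--     return [s for s in base if s not in skip]
-- ===== Notes on version B (the rewrite author's own statement) =====
-- stated objective: simpler
-- what changed: The ten-branch if/elif chain of per-system set-difference-then-sort blocks is replaced by one (base, exclusions) table lookup plus a single ordered filter pass over the already-sorted duplicate-free base list, so no set materialisation of the base and no sort is performed.
import Mathlib
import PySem

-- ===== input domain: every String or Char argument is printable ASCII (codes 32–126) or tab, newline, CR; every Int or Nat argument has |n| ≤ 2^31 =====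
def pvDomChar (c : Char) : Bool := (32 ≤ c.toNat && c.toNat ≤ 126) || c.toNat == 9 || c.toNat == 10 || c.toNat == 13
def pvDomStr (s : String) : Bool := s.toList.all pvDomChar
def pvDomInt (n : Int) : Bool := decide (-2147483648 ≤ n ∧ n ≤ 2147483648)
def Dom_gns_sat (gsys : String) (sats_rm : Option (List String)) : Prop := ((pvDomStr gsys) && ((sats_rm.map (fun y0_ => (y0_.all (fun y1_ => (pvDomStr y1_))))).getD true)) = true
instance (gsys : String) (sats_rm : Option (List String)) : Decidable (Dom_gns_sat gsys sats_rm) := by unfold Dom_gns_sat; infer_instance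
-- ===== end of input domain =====

-- B replaces A's ten-branch if/elif chain of set-difference-then-sort blocks by one
-- (base, exclusions) table lookup plus a single ordered filter pass (no sort needed).

-- ===== PORT A =====

-- f"{i:0>2d}" prefixed with p: decimal digits of i left-padded with '0' to width 2
-- (exact for every int; here only positive two-digit-or-less i occur)
def pvFmt2 (p : String) (i : Int) : String :=
  let s := PySem.Int.toChars i
  String.ofList (p.toList ++ (if s.length < 2 then List.replicate (2 - s.length) '0' ++ s else s))

def gnsNameDict : PySem.Dict String String :=
  ⟨[("G", "GPS"), ("R", "GLO"), ("E", "GAL"), ("C", "BDS"), ("C2", "BD2"),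
    ("C3", "BD3"), ("CG", "BDG"), ("CI", "BDI"), ("CM", "BDM"), ("J", "QZS")]⟩

def gns_name (gsys : String) : String :=
  if decide (PySem.Str.len gsys < 3) && PySem.Dict.contains gnsNameDict gsys then
    PySem.Dict.getD gnsNameDict gsys ""
  else if decide (PySem.Str.len gsys = 3) && (PySem.Dict.values gnsNameDict).contains gsys then
    gsys
  else ""


def gns_sat (gsys : String) (sats_rm : Option (List String)) : List String :=
  let sats_rm := sats_rm.getD []  -- if sats_rm is None: sats_rm = []
  let gsys := gns_name gsys
  if gsys == "GPS" then
    let sat := (PySem.List.pyRange 1 33 1).map (pvFmt2 "G")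
    let exc : List String := [] ++ sats_rm
    PySem.List.sorted (PySem.Set.diff (PySem.Set.ofList sat) (PySem.Set.ofList exc)) (fun x => x) false
  else if gsys == "BDS" then
    let sat := ((PySem.List.pyRange 1 62 1).filter (fun i => decide (i < 47) || decide (i > 58))).map (pvFmt2 "C")
    let exc : List String := ["C15", "C17", "C18", "C31", "C61"] ++ sats_rm
    PySem.List.sorted (PySem.Set.diff (PySem.Set.ofList sat) (PySem.Set.ofList exc)) (fun x => x) false
  else if gsys == "BD2" then
    let sat := (PySem.List.pyRange 1 17 1).map (pvFmt2 "C")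
    let exc : List String := ["C15"] ++ sats_rm
    PySem.List.sorted (PySem.Set.diff (PySem.Set.ofList sat) (PySem.Set.ofList exc)) (fun x => x) false
  else if gsys == "BD3" then
    let sat := ((PySem.List.pyRange 19 62 1).filter (fun i => decide (i < 47) || decide (i > 58))).map (pvFmt2 "C")
    let exc : List String := ["C31", "C61"] ++ sats_rm
    PySem.List.sorted (PySem.Set.diff (PySem.Set.ofList sat) (PySem.Set.ofList exc)) (fun x => x) false
  else if gsys == "BDG" then
    let sat := ["C01", "C02", "C03", "C04", "C05", "C59", "C60"]
    PySem.List.sorted (PySem.Set.diff (PySem.Set.ofList sat) (PySem.Set.ofList sats_rm)) (fun x => x) false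
  else if gsys == "BDI" then
    let sat := ["C06", "C07", "C08", "C09", "C10", "C13", "C16", "C38", "C39", "C40"]
    PySem.List.sorted (PySem.Set.diff (PySem.Set.ofList sat) (PySem.Set.ofList sats_rm)) (fun x => x) false
  else if gsys == "BDM" then
    let sat := (PySem.List.pyRange 11 47 1).map (pvFmt2 "C")
    let exc : List String := ["C13", "C16", "C38", "C39", "C40"] ++ sats_rm
    PySem.List.sorted (PySem.Set.diff (PySem.Set.ofList sat) (PySem.Set.ofList exc)) (fun x => x) false
  else if gsys == "GAL" then
    let sat := (PySem.List.pyRange 1 37 1).map (pvFmt2 "E")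
    let exc : List String := ["E20", "E22", "E06", "E10", "E16", "E17", "E23", "E28", "E29", "E32", "E34", "E35"] ++ sats_rm
    PySem.List.sorted (PySem.Set.diff (PySem.Set.ofList sat) (PySem.Set.ofList exc)) (fun x => x) false
  else if gsys == "GLO" then
    let sat := (PySem.List.pyRange 1 25 1).map (pvFmt2 "R")
    let exc : List String := [] ++ sats_rm
    PySem.List.sorted (PySem.Set.diff (PySem.Set.ofList sat) (PySem.Set.ofList exc)) (fun x => x) false
  else if gsys == "QZS" then
    let sat := (PySem.List.pyRange 1 8 1).map (pvFmt2 "J")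
    let exc : List String := [] ++ sats_rm
    PySem.List.sorted (PySem.Set.diff (PySem.Set.ofList sat) (PySem.Set.ofList exc)) (fun x => x) false
  else []


-- ===== PORT B =====

def altAlias : PySem.Dict String String :=
  ⟨[("G", "GPS"), ("R", "GLO"), ("E", "GAL"), ("C", "BDS"), ("C2", "BD2"),
    ("C3", "BD3"), ("CG", "BDG"), ("CI", "BDI"), ("CM", "BDM"), ("J", "QZS")]⟩


def altTable : PySem.Dict String (List String × List String) :=
  ⟨[
    ("GPS", (["G01", "G02", "G03", "G04", "G05", "G06", "G07", "G08", "G09", "G10", "G11", "G12", "G13", "G14", "G15", "G16", "G17", "G18", "G19", "G20", "G21", "G22", "G23", "G24", "G25", "G26", "G27", "G28", "G29", "G30", "G31", "G32"], [])),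
    ("BDS", (["C01", "C02", "C03", "C04", "C05", "C06", "C07", "C08", "C09", "C10", "C11", "C12", "C13", "C14", "C15", "C16", "C17", "C18", "C19", "C20", "C21", "C22", "C23", "C24", "C25", "C26", "C27", "C28", "C29", "C30", "C31", "C32", "C33", "C34", "C35", "C36", "C37", "C38", "C39", "C40", "C41", "C42", "C43", "C44", "C45", "C46", "C59", "C60", "C61"], ["C15", "C17", "C18", "C31", "C61"])),
    ("BD2", (["C01", "C02", "C03", "C04", "C05", "C06", "C07", "C08", "C09", "C10", "C11", "C12", "C13", "C14", "C15", "C16"], ["C15"])),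
    ("BD3", (["C19", "C20", "C21", "C22", "C23", "C24", "C25", "C26", "C27", "C28", "C29", "C30", "C31", "C32", "C33", "C34", "C35", "C36", "C37", "C38", "C39", "C40", "C41", "C42", "C43", "C44", "C45", "C46", "C59", "C60", "C61"], ["C31", "C61"])),
    ("BDG", (["C01", "C02", "C03", "C04", "C05", "C59", "C60"], [])),
    ("BDI", (["C06", "C07", "C08", "C09", "C10", "C13", "C16", "C38", "C39", "C40"], [])),
    ("BDM", (["C11", "C12", "C13", "C14", "C15", "C16", "C17", "C18", "C19", "C20", "C21", "C22", "C23", "C24", "C25", "C26", "C27", "C28", "C29", "C30", "C31", "C32", "C33", "C34", "C35", "C36", "C37", "C38", "C39", "C40", "C41", "C42", "C43", "C44", "C45", "C46"], ["C13", "C16", "C38", "C39", "C40"])),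
    ("GAL", (["E01", "E02", "E03", "E04", "E05", "E06", "E07", "E08", "E09", "E10", "E11", "E12", "E13", "E14", "E15", "E16", "E17", "E18", "E19", "E20", "E21", "E22", "E23", "E24", "E25", "E26", "E27", "E28", "E29", "E30", "E31", "E32", "E33", "E34", "E35", "E36"], ["E20", "E22", "E06", "E10", "E16", "E17", "E23", "E28", "E29", "E32", "E34", "E35"])),
    ("GLO", (["R01", "R02", "R03", "R04", "R05", "R06", "R07", "R08", "R09", "R10", "R11", "R12", "R13", "R14", "R15", "R16", "R17", "R18", "R19", "R20", "R21", "R22", "R23", "R24"], [])),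
    ("QZS", (["J01", "J02", "J03", "J04", "J05", "J06", "J07"], []))
  ]⟩


def gns_sat_alt (gsys : String) (sats_rm : Option (List String)) : List String :=
  let entry :=
    match PySem.Dict.get? altTable gsys with
    | some e => some e
    | none => PySem.Dict.get? altTable (PySem.Dict.getD altAlias gsys "")
  match entry with
  | none => []
  | some (base, exc) =>
    let skip := PySem.Set.update (PySem.Set.ofList exc) (sats_rm.getD [])  -- sats_rm or []
    base.filter (fun s => !(PySem.Set.contains skip s))

-- ===== PRECONDITION & SPEC =====
def Spec_gns_sat (gsys : String) (sats_rm : Option (List String)) (out : List String) : Prop := out = gns_sat_alt gsys sats_rm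
instance (gsys : String) (sats_rm : Option (List String)) (out : List String) : Decidable (Spec_gns_sat gsys sats_rm out) := by unfold Spec_gns_sat; infer_instance

-- ===== CLAIM (what is proved, stated in full; the proofs are below) =====
def Claim_equal_gns_sat : Prop := ∀ (gsys : String) (sats_rm : Option (List String)), Dom_gns_sat gsys sats_rm → Spec_gns_sat gsys sats_rm (gns_sat gsys sats_rm)

-- ===== LEMMAS AND PROOFS =====

-- shape of every branch of A: sorted set-difference of a base list and (exclusions ++ removals)
def pvAB (base exc : List String) (rm : Option (List String)) : List String :=
  PySem.List.sorted (PySem.Set.diff (PySem.Set.ofList base) (PySem.Set.ofList (exc ++ rm.getD []))) (fun x => x) false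

-- shape of every branch of B: ordered filter of the base list against the skip set
def pvBB (base exc : List String) (rm : Option (List String)) : List String :=
  base.filter (fun s => !(PySem.Set.contains (PySem.Set.update (PySem.Set.ofList exc) (rm.getD [])) s))

lemma pvBranch (baseA baseB exc : List String) (rm : Option (List String))
    (hab : baseA = baseB)
    (hb : List.Pairwise (fun a b : String => a.toList < b.toList) baseB) :
    pvAB baseA exc rm = pvBB baseB exc rm := by
  subst hab
  have hb' : List.Pairwise (fun a b : String => a < b) baseA :=
    hb.imp (fun h => String.lt_iff_toList_lt.mpr h)
  unfold pvAB pvBB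
  have hset : PySem.Set.ofList (exc ++ rm.getD []) =
      PySem.Set.update (PySem.Set.ofList exc) (rm.getD []) := by
    simp [PySem.Set.ofList, PySem.Set.update, List.foldl_append]
  rw [hset, PySem.Set.ofList_eq_self_of_nodup baseA (hb'.imp (fun h => ne_of_lt h))]
  exact PySem.List.sorted_eq_of_perm_of_pairwise_lt _ _ _ (List.Perm.refl _) (hb'.filter _)


lemma pvCase_G (rm : Option (List String)) : gns_sat "G" rm = gns_sat_alt "G" rm := by
  have h := pvBranch ((PySem.List.pyRange 1 33 1).map (pvFmt2 "G")) (["G01", "G02", "G03", "G04", "G05", "G06", "G07", "G08", "G09", "G10", "G11", "G12", "G13", "G14", "G15", "G16", "G17", "G18", "G19", "G20", "G21", "G22", "G23", "G24", "G25", "G26", "G27", "G28", "G29", "G30", "G31", "G32"]) ([]) rm (by decide) (by decide)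
  exact h

lemma pvCase_R (rm : Option (List String)) : gns_sat "R" rm = gns_sat_alt "R" rm := by
  have h := pvBranch ((PySem.List.pyRange 1 25 1).map (pvFmt2 "R")) (["R01", "R02", "R03", "R04", "R05", "R06", "R07", "R08", "R09", "R10", "R11", "R12", "R13", "R14", "R15", "R16", "R17", "R18", "R19", "R20", "R21", "R22", "R23", "R24"]) ([]) rm (by decide) (by decide)
  exact h

lemma pvCase_E (rm : Option (List String)) : gns_sat "E" rm = gns_sat_alt "E" rm := by
  have h := pvBranch ((PySem.List.pyRange 1 37 1).map (pvFmt2 "E")) (["E01", "E02", "E03", "E04", "E05", "E06", "E07", "E08", "E09", "E10", "E11", "E12", "E13", "E14", "E15", "E16", "E17", "E18", "E19", "E20", "E21", "E22", "E23", "E24", "E25", "E26", "E27", "E28", "E29", "E30", "E31", "E32", "E33", "E34", "E35", "E36"]) (["E20", "E22", "E06", "E10", "E16", "E17", "E23", "E28", "E29", "E32", "E34", "E35"]) rm (by decide) (by decide)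
  exact h

lemma pvCase_C (rm : Option (List String)) : gns_sat "C" rm = gns_sat_alt "C" rm := by
  have h := pvBranch (((PySem.List.pyRange 1 62 1).filter (fun i => decide (i < 47) || decide (i > 58))).map (pvFmt2 "C")) (["C01", "C02", "C03", "C04", "C05", "C06", "C07", "C08", "C09", "C10", "C11", "C12", "C13", "C14", "C15", "C16", "C17", "C18", "C19", "C20", "C21", "C22", "C23", "C24", "C25", "C26", "C27", "C28", "C29", "C30", "C31", "C32", "C33", "C34", "C35", "C36", "C37", "C38", "C39", "C40", "C41", "C42", "C43", "C44", "C45", "C46", "C59", "C60", "C61"]) (["C15", "C17", "C18", "C31", "C61"]) rm (by decide) (by decide)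
  exact h

lemma pvCase_C2 (rm : Option (List String)) : gns_sat "C2" rm = gns_sat_alt "C2" rm := by
  have h := pvBranch ((PySem.List.pyRange 1 17 1).map (pvFmt2 "C")) (["C01", "C02", "C03", "C04", "C05", "C06", "C07", "C08", "C09", "C10", "C11", "C12", "C13", "C14", "C15", "C16"]) (["C15"]) rm (by decide) (by decide)
  exact h

lemma pvCase_C3 (rm : Option (List String)) : gns_sat "C3" rm = gns_sat_alt "C3" rm := by
  have h := pvBranch (((PySem.List.pyRange 19 62 1).filter (fun i => decide (i < 47) || decide (i > 58))).map (pvFmt2 "C")) (["C19", "C20", "C21", "C22", "C23", "C24", "C25", "C26", "C27", "C28", "C29", "C30", "C31", "C32", "C33", "C34", "C35", "C36", "C37", "C38", "C39", "C40", "C41", "C42", "C43", "C44", "C45", "C46", "C59", "C60", "C61"]) (["C31", "C61"]) rm (by decide) (by decide)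
  exact h

lemma pvCase_CG (rm : Option (List String)) : gns_sat "CG" rm = gns_sat_alt "CG" rm := by
  have h := pvBranch (["C01", "C02", "C03", "C04", "C05", "C59", "C60"]) (["C01", "C02", "C03", "C04", "C05", "C59", "C60"]) ([]) rm (by decide) (by decide)
  exact h

lemma pvCase_CI (rm : Option (List String)) : gns_sat "CI" rm = gns_sat_alt "CI" rm := by
  have h := pvBranch (["C06", "C07", "C08", "C09", "C10", "C13", "C16", "C38", "C39", "C40"]) (["C06", "C07", "C08", "C09", "C10", "C13", "C16", "C38", "C39", "C40"]) ([]) rm (by decide) (by decide)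
  exact h

lemma pvCase_CM (rm : Option (List String)) : gns_sat "CM" rm = gns_sat_alt "CM" rm := by
  have h := pvBranch ((PySem.List.pyRange 11 47 1).map (pvFmt2 "C")) (["C11", "C12", "C13", "C14", "C15", "C16", "C17", "C18", "C19", "C20", "C21", "C22", "C23", "C24", "C25", "C26", "C27", "C28", "C29", "C30", "C31", "C32", "C33", "C34", "C35", "C36", "C37", "C38", "C39", "C40", "C41", "C42", "C43", "C44", "C45", "C46"]) (["C13", "C16", "C38", "C39", "C40"]) rm (by decide) (by decide)
  exact h

lemma pvCase_J (rm : Option (List String)) : gns_sat "J" rm = gns_sat_alt "J" rm := by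
  have h := pvBranch ((PySem.List.pyRange 1 8 1).map (pvFmt2 "J")) (["J01", "J02", "J03", "J04", "J05", "J06", "J07"]) ([]) rm (by decide) (by decide)
  exact h

lemma pvCase_GPS (rm : Option (List String)) : gns_sat "GPS" rm = gns_sat_alt "GPS" rm := by
  have h := pvBranch ((PySem.List.pyRange 1 33 1).map (pvFmt2 "G")) (["G01", "G02", "G03", "G04", "G05", "G06", "G07", "G08", "G09", "G10", "G11", "G12", "G13", "G14", "G15", "G16", "G17", "G18", "G19", "G20", "G21", "G22", "G23", "G24", "G25", "G26", "G27", "G28", "G29", "G30", "G31", "G32"]) ([]) rm (by decide) (by decide)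
  exact h

lemma pvCase_BDS (rm : Option (List String)) : gns_sat "BDS" rm = gns_sat_alt "BDS" rm := by
  have h := pvBranch (((PySem.List.pyRange 1 62 1).filter (fun i => decide (i < 47) || decide (i > 58))).map (pvFmt2 "C")) (["C01", "C02", "C03", "C04", "C05", "C06", "C07", "C08", "C09", "C10", "C11", "C12", "C13", "C14", "C15", "C16", "C17", "C18", "C19", "C20", "C21", "C22", "C23", "C24", "C25", "C26", "C27", "C28", "C29", "C30", "C31", "C32", "C33", "C34", "C35", "C36", "C37", "C38", "C39", "C40", "C41", "C42", "C43", "C44", "C45", "C46", "C59", "C60", "C61"]) (["C15", "C17", "C18", "C31", "C61"]) rm (by decide) (by decide)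
  exact h

lemma pvCase_BD2 (rm : Option (List String)) : gns_sat "BD2" rm = gns_sat_alt "BD2" rm := by
  have h := pvBranch ((PySem.List.pyRange 1 17 1).map (pvFmt2 "C")) (["C01", "C02", "C03", "C04", "C05", "C06", "C07", "C08", "C09", "C10", "C11", "C12", "C13", "C14", "C15", "C16"]) (["C15"]) rm (by decide) (by decide)
  exact h

lemma pvCase_BD3 (rm : Option (List String)) : gns_sat "BD3" rm = gns_sat_alt "BD3" rm := by
  have h := pvBranch (((PySem.List.pyRange 19 62 1).filter (fun i => decide (i < 47) || decide (i > 58))).map (pvFmt2 "C")) (["C19", "C20", "C21", "C22", "C23", "C24", "C25", "C26", "C27", "C28", "C29", "C30", "C31", "C32", "C33", "C34", "C35", "C36", "C37", "C38", "C39", "C40", "C41", "C42", "C43", "C44", "C45", "C46", "C59", "C60", "C61"]) (["C31", "C61"]) rm (by decide) (by decide)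
  exact h

lemma pvCase_BDG (rm : Option (List String)) : gns_sat "BDG" rm = gns_sat_alt "BDG" rm := by
  have h := pvBranch (["C01", "C02", "C03", "C04", "C05", "C59", "C60"]) (["C01", "C02", "C03", "C04", "C05", "C59", "C60"]) ([]) rm (by decide) (by decide)
  exact h

lemma pvCase_BDI (rm : Option (List String)) : gns_sat "BDI" rm = gns_sat_alt "BDI" rm := by
  have h := pvBranch (["C06", "C07", "C08", "C09", "C10", "C13", "C16", "C38", "C39", "C40"]) (["C06", "C07", "C08", "C09", "C10", "C13", "C16", "C38", "C39", "C40"]) ([]) rm (by decide) (by decide)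
  exact h

lemma pvCase_BDM (rm : Option (List String)) : gns_sat "BDM" rm = gns_sat_alt "BDM" rm := by
  have h := pvBranch ((PySem.List.pyRange 11 47 1).map (pvFmt2 "C")) (["C11", "C12", "C13", "C14", "C15", "C16", "C17", "C18", "C19", "C20", "C21", "C22", "C23", "C24", "C25", "C26", "C27", "C28", "C29", "C30", "C31", "C32", "C33", "C34", "C35", "C36", "C37", "C38", "C39", "C40", "C41", "C42", "C43", "C44", "C45", "C46"]) (["C13", "C16", "C38", "C39", "C40"]) rm (by decide) (by decide)
  exact h

lemma pvCase_GAL (rm : Option (List String)) : gns_sat "GAL" rm = gns_sat_alt "GAL" rm := by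
  have h := pvBranch ((PySem.List.pyRange 1 37 1).map (pvFmt2 "E")) (["E01", "E02", "E03", "E04", "E05", "E06", "E07", "E08", "E09", "E10", "E11", "E12", "E13", "E14", "E15", "E16", "E17", "E18", "E19", "E20", "E21", "E22", "E23", "E24", "E25", "E26", "E27", "E28", "E29", "E30", "E31", "E32", "E33", "E34", "E35", "E36"]) (["E20", "E22", "E06", "E10", "E16", "E17", "E23", "E28", "E29", "E32", "E34", "E35"]) rm (by decide) (by decide)
  exact h

lemma pvCase_GLO (rm : Option (List String)) : gns_sat "GLO" rm = gns_sat_alt "GLO" rm := by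
  have h := pvBranch ((PySem.List.pyRange 1 25 1).map (pvFmt2 "R")) (["R01", "R02", "R03", "R04", "R05", "R06", "R07", "R08", "R09", "R10", "R11", "R12", "R13", "R14", "R15", "R16", "R17", "R18", "R19", "R20", "R21", "R22", "R23", "R24"]) ([]) rm (by decide) (by decide)
  exact h

lemma pvCase_QZS (rm : Option (List String)) : gns_sat "QZS" rm = gns_sat_alt "QZS" rm := by
  have h := pvBranch ((PySem.List.pyRange 1 8 1).map (pvFmt2 "J")) (["J01", "J02", "J03", "J04", "J05", "J06", "J07"]) ([]) rm (by decide) (by decide)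
  exact h


lemma pvDefault (g : String) (rm : Option (List String)) (h0 : g ≠ "G") (h1 : g ≠ "R") (h2 : g ≠ "E") (h3 : g ≠ "C") (h4 : g ≠ "C2") (h5 : g ≠ "C3") (h6 : g ≠ "CG") (h7 : g ≠ "CI") (h8 : g ≠ "CM") (h9 : g ≠ "J") (h10 : g ≠ "GPS") (h11 : g ≠ "BDS") (h12 : g ≠ "BD2") (h13 : g ≠ "BD3") (h14 : g ≠ "BDG") (h15 : g ≠ "BDI") (h16 : g ≠ "BDM") (h17 : g ≠ "GAL") (h18 : g ≠ "GLO") (h19 : g ≠ "QZS") :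
    gns_sat g rm = gns_sat_alt g rm := by
  have hname : gns_name g = "" := by
    simp [gns_name, gnsNameDict, PySem.Dict.contains, PySem.Dict.values, Ne.symm h0, Ne.symm h1, Ne.symm h2, Ne.symm h3, Ne.symm h4, Ne.symm h5, Ne.symm h6, Ne.symm h7, Ne.symm h8, Ne.symm h9, h10, h11, h12, h13, h14, h15, h16, h17, h18, h19]
  have hA : gns_sat g rm = [] := by
    simp [gns_sat, hname]
  have hB : gns_sat_alt g rm = [] := by
    simp [gns_sat_alt, altTable, altAlias, PySem.Dict.get?, PySem.Dict.getD, Ne.symm h0, Ne.symm h1, Ne.symm h2, Ne.symm h3, Ne.symm h4, Ne.symm h5, Ne.symm h6, Ne.symm h7, Ne.symm h8, Ne.symm h9, Ne.symm h10, Ne.symm h11, Ne.symm h12, Ne.symm h13, Ne.symm h14, Ne.symm h15, Ne.symm h16, Ne.symm h17, Ne.symm h18, Ne.symm h19]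
  rw [hA, hB]


-- ===== VERDICT (by name: the statement is the Claim_ definition above) =====
theorem gns_sat_spec : Claim_equal_gns_sat := by
  intro g rm _
  unfold Spec_gns_sat
  by_cases h0 : g = "G"
  · subst h0; exact pvCase_G rm
  by_cases h1 : g = "R"
  · subst h1; exact pvCase_R rm
  by_cases h2 : g = "E"
  · subst h2; exact pvCase_E rm
  by_cases h3 : g = "C"
  · subst h3; exact pvCase_C rm
  by_cases h4 : g = "C2"
  · subst h4; exact pvCase_C2 rm
  by_cases h5 : g = "C3"
  · subst h5; exact pvCase_C3 rm
  by_cases h6 : g = "CG"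
  · subst h6; exact pvCase_CG rm
  by_cases h7 : g = "CI"
  · subst h7; exact pvCase_CI rm
  by_cases h8 : g = "CM"
  · subst h8; exact pvCase_CM rm
  by_cases h9 : g = "J"
  · subst h9; exact pvCase_J rm
  by_cases h10 : g = "GPS"
  · subst h10; exact pvCase_GPS rm
  by_cases h11 : g = "BDS"
  · subst h11; exact pvCase_BDS rm
  by_cases h12 : g = "BD2"
  · subst h12; exact pvCase_BD2 rm
  by_cases h13 : g = "BD3"
  · subst h13; exact pvCase_BD3 rm
  by_cases h14 : g = "BDG"
  · subst h14; exact pvCase_BDG rm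
  by_cases h15 : g = "BDI"
  · subst h15; exact pvCase_BDI rm
  by_cases h16 : g = "BDM"
  · subst h16; exact pvCase_BDM rm
  by_cases h17 : g = "GAL"
  · subst h17; exact pvCase_GAL rm
  by_cases h18 : g = "GLO"
  · subst h18; exact pvCase_GLO rm
  by_cases h19 : g = "QZS"
  · subst h19; exact pvCase_QZS rm
  exact pvDefault g rm h0 h1 h2 h3 h4 h5 h6 h7 h8 h9 h10 h11 h12 h13 h14 h15 h16 h17 h18 h19
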